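-- pv_equiv track=rewrite | github.com/AnandRamasamy3/BBOT | src/security/ooops.py | get_points_for_the_message
-- ===== SOURCE A (Python) =====
-- def get_points_for_the_message(message):
-- 	points=[]
-- 	initial_x=855
-- 	initial_y=0
-- 	for i in range(len(message)):
-- 		points.append([initial_x,initial_y])
-- 		if initial_x>=155:
-- 			initial_x=initial_x-25
-- 		else:
-- 			initial_x=855
-- 			initial_y=initial_y+20
-- 	return points
-- ===== SOURCE B (Python) =====
-- def get_points_for_the_message(message):
--     return [[855 - 25 * (i % 30), 20 * (i // 30)] for i in range(len(message))]
-- ===== Notes on version B (the rewrite author's own statement) =====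
-- stated objective: simpler
-- what changed: Replaces the stateful loop carrying (x,y) and an if/else reset with a stateless comprehension computing each point in closed form from its index: x = 855 - 25*(i % 30), y = 20*(i // 30).
import Mathlib
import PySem

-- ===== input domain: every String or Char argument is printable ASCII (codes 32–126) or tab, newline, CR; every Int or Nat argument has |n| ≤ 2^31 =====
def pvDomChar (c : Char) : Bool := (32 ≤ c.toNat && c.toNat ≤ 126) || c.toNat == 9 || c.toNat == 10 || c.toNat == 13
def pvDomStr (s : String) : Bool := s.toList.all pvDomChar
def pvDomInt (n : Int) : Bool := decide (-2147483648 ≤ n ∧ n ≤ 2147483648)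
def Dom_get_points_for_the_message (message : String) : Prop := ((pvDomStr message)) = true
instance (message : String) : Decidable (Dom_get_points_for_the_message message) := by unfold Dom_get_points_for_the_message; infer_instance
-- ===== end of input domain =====

-- B replaces A's stateful (x,y) accumulator and if/else reset with a stateless
-- closed-form point per index (simpler; same O(n) cost).

-- ===== PORT A =====
-- for-loop carrying (points, initial_x, initial_y); i is unused by the body
def get_points_for_the_message (message : String) : List (List Int) :=
  ((PySem.List.pyRange 0 (PySem.Str.len message) 1).foldl
    (fun (s : List (List Int) × Int × Int) (_ : Int) =>
      let pts := s.1 ++ [[s.2.1, s.2.2]]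
      if s.2.1 ≥ 155 then (pts, s.2.1 - 25, s.2.2)
      else (pts, 855, s.2.2 + 20))
    ([], 855, 0)).1

-- ===== PORT B =====
def get_points_for_the_message_alt (message : String) : List (List Int) :=
  (PySem.List.pyRange 0 (PySem.Str.len message) 1).map
    (fun i => [855 - 25 * PySem.Int.mod i 30, 20 * PySem.Int.floordiv i 30])

-- ===== PRECONDITION & SPEC =====
def Spec_get_points_for_the_message (message : String) (out : List (List Int)) : Prop := out = get_points_for_the_message_alt message
instance (message : String) (out : List (List Int)) : Decidable (Spec_get_points_for_the_message message out) := by unfold Spec_get_points_for_the_message; infer_instance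

-- ===== CLAIM (what is proved, stated in full; the proofs are below) =====
def Claim_equal_get_points_for_the_message : Prop := ∀ (message : String), Dom_get_points_for_the_message message → Spec_get_points_for_the_message message (get_points_for_the_message message)

-- ===== LEMMAS AND PROOFS =====

-- loop invariant: after n steps A's state is the closed-form prefix together with
-- the closed-form (x, y) for index n
theorem pv_loop_closed (n : Nat) :
    (PySem.List.pyRange 0 (n : Int) 1).foldl
      (fun (s : List (List Int) × Int × Int) (_ : Int) =>
        let pts := s.1 ++ [[s.2.1, s.2.2]]
        if s.2.1 ≥ 155 then (pts, s.2.1 - 25, s.2.2)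
        else (pts, 855, s.2.2 + 20))
      ([], 855, 0)
    = ((PySem.List.pyRange 0 (n : Int) 1).map
        (fun i => [855 - 25 * PySem.Int.mod i 30, 20 * PySem.Int.floordiv i 30]),
       855 - 25 * ((n : Int) % 30), 20 * ((n : Int) / 30)) := by
  induction n with
  | zero => simp
  | succ n ih =>
      have h0 : (0 : Int) ≤ (n : Int) := by exact_mod_cast Nat.zero_le n
      have hrange : PySem.List.pyRange 0 ((n + 1 : Nat) : Int) 1
          = PySem.List.pyRange 0 (n : Int) 1 ++ [(n : Int)] := by
        push_cast
        exact PySem.List.pyRange_one_succ_right h0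
      rw [hrange, List.foldl_append, ih, List.map_append]
      simp only [List.foldl_cons, List.foldl_nil, List.map_cons, List.map_nil,
        PySem.Int.mod_eq_emod_of_pos (a := (n : Int)) (b := 30) (by norm_num),
        PySem.Int.floordiv_eq_ediv_of_pos (a := (n : Int)) (b := 30) (by norm_num)]
      split_ifs with h
      · refine Prod.ext ?_ (Prod.ext ?_ ?_) <;> simp <;> push_cast <;> omega
      · refine Prod.ext ?_ (Prod.ext ?_ ?_) <;> simp <;> push_cast <;> omega

-- ===== VERDICT (by name: the statement is the Claim_ definition above) =====
theorem get_points_for_the_message_spec : Claim_equal_get_points_for_the_message := by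
  intro message _
  unfold Spec_get_points_for_the_message get_points_for_the_message get_points_for_the_message_alt
  rw [PySem.Str.len_eq, pv_loop_closed]
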